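-- pv_equiv track=rewrite | github.com/miliar/Code_Jam_Webscraper | solutions_python/solutions_year13_round2_nr1/477.py | calcHowManyTimesAdd
-- ===== SOURCE A (Python) =====
-- def calcHowManyTimesAdd(currentval, target):
--     if currentval == 1:
--         return -1, 10000000000000000000
--     elif(currentval > target):
--         return 0 , currentval+target
--     elif currentval == target:
--         return 1 , currentval + currentval -1 + target
--     else:
--         count = 0
--         while True:
--             currentval += currentval - 1
--             count += 1
--             if currentval > target:
--                 break
--         return count , currentval +target
-- ===== SOURCE B (Python) =====
-- def calcHowManyTimesAdd(currentval, target):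
--     if currentval == 1:
--         return -1, 10000000000000000000
--     elif currentval > target:
--         return 0, currentval + target
--     elif currentval == target:
--         return 1, currentval + currentval - 1 + target
--     else:
--         # after k loop steps A's value is d*2**k + 1 with d = currentval - 1;
--         # the loop stops at the least k >= 1 with d*2**k >= target: closed form via ceil division + bit_length
--         d = currentval - 1
--         m = -(-target // d)                 # ceil(target / d)
--         count = max(1, (m - 1).bit_length())
--         return count, d * 2 ** count + 1 + target
-- ===== Notes on version B (the rewrite author's own statement) =====
-- stated objective: alternative
-- what changed: Replaces A's doubling while-loop with a closed form: the loop count is computed directly as max(1, bit_length(ceil(target/(currentval-1)) - 1)) and the final value as (currentval-1)*2**count + 1 + target, so the iteration disappears (not measurably faster here: both run in microseconds).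
import Mathlib
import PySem

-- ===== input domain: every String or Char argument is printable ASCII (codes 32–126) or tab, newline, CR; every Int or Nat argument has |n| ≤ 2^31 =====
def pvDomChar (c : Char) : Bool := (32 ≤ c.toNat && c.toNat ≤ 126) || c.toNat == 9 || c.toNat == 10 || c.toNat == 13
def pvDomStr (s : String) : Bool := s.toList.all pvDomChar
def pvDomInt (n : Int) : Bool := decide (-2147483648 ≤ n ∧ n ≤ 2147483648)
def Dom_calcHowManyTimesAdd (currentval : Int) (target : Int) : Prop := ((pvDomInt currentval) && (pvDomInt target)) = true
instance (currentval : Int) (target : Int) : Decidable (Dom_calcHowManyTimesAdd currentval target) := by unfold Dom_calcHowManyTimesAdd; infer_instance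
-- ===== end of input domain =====

-- B replaces A's doubling while-loop by a closed form (ceil division + bit length); alternative algorithm, same observable results.


-- ===== PORT A =====
-- A's 'while True' loop; the fuel argument only makes it total, it never runs out inside Pre_.
def pvLoopA : Nat → Int → Int → Int → Int × Int
  | 0, cv, _, count => (count, cv)
  | f + 1, cv, target, count =>
    let cv' := cv + (cv - 1)
    let count' := count + 1
    if target < cv' then (count', cv')
    else pvLoopA f cv' target count'

def calcHowManyTimesAdd (currentval : Int) (target : Int) : Int × Int :=
  if currentval = 1 then (-1, 10000000000000000000)
  else if target < currentval then (0, currentval + target)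
  else if currentval = target then (1, currentval + currentval - 1 + target)
  else
    let r := pvLoopA ((target - currentval).toNat + 1) currentval target 0
    (r.1, r.2 + target)

-- ===== PORT B =====
def calcHowManyTimesAdd_alt (currentval : Int) (target : Int) : Int × Int :=
  if currentval = 1 then (-1, 10000000000000000000)
  else if target < currentval then (0, currentval + target)
  else if currentval = target then (1, currentval + currentval - 1 + target)
  else
    let d := currentval - 1
    let m := -(PySem.Int.floordiv (-target) d)
    let count : Nat := max 1 (PySem.Int.bitLength (m - 1))
    ((count : Int), d * 2 ^ count + 1 + target)

-- ===== PRECONDITION & SPEC =====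
-- Pre_ excludes exactly the inputs on which A's while-loop never terminates:
-- currentval ≤ 0 together with currentval < target (then cv += cv - 1 only decreases cv).
def Pre_calcHowManyTimesAdd (currentval : Int) (target : Int) : Prop :=
  1 ≤ currentval ∨ target ≤ currentval
instance (currentval : Int) (target : Int) : Decidable (Pre_calcHowManyTimesAdd currentval target) := by
  unfold Pre_calcHowManyTimesAdd; infer_instance

def pvWitness_calcHowManyTimesAdd : Int × Int := (3, 100)

def Spec_calcHowManyTimesAdd (currentval : Int) (target : Int) (out : Int × Int) : Prop := out = calcHowManyTimesAdd_alt currentval target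
instance (currentval : Int) (target : Int) (out : Int × Int) : Decidable (Spec_calcHowManyTimesAdd currentval target out) := by unfold Spec_calcHowManyTimesAdd; infer_instance

-- ===== CLAIM (what is proved, stated in full; the proofs are below) =====
def Claim_equal_calcHowManyTimesAdd : Prop := ∀ (currentval : Int) (target : Int), Dom_calcHowManyTimesAdd currentval target → Pre_calcHowManyTimesAdd currentval target → Spec_calcHowManyTimesAdd currentval target (calcHowManyTimesAdd currentval target)

-- ===== LEMMAS AND PROOFS =====

-- Characterisation of the loop: starting from cv with 2 ≤ cv ≤ target and enough fuel,
-- it returns (count + k, (cv-1)*2^k + 1) for the least k ≥ 1 whose value exceeds target.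
lemma pvLoopA_spec : ∀ (f : Nat) (cv t count : Int), 2 ≤ cv → cv ≤ t → (t - cv).toNat < f →
    ∃ k : Nat, pvLoopA f cv t count = (count + k, (cv - 1) * 2 ^ k + 1) ∧ 1 ≤ k ∧
      t < (cv - 1) * 2 ^ k + 1 ∧ (k = 1 ∨ (cv - 1) * 2 ^ (k - 1) + 1 ≤ t) := by
  intro f
  induction f with
  | zero => intro cv t count _ _ h; omega
  | succ f ih =>
    intro cv t count hcv hle hf
    by_cases hstop : t < cv + (cv - 1)
    · refine ⟨1, ?_, le_refl _, ?_, Or.inl rfl⟩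
      · simp [pvLoopA, hstop]; ring
      · have : (cv - 1) * 2 ^ 1 + 1 = cv + (cv - 1) := by ring
        omega
    · have hcv' : 2 ≤ cv + (cv - 1) := by omega
      have hle' : cv + (cv - 1) ≤ t := by omega
      have hf' : (t - (cv + (cv - 1))).toNat < f := by omega
      obtain ⟨k', hk', hk1, hk2, hk3⟩ := ih (cv + (cv - 1)) t (count + 1) hcv' hle' hf'
      refine ⟨k' + 1, ?_, by omega, ?_, ?_⟩
      · have hrec : pvLoopA (f + 1) cv t count = pvLoopA f (cv + (cv - 1)) t (count + 1) := by
          simp [pvLoopA, hstop]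
        rw [hrec, hk']
        simp only [Prod.mk.injEq]
        constructor
        · omega
        · have : (cv + (cv - 1) - 1) * 2 ^ k' = (cv - 1) * 2 ^ (k' + 1) := by ring
          omega
      · have : (cv + (cv - 1) - 1) * 2 ^ k' = (cv - 1) * 2 ^ (k' + 1) := by ring
        omega
      · right
        rcases hk3 with h1 | h2
        · subst h1
          have : (cv - 1) * 2 ^ (1 + 1 - 1) + 1 = cv + (cv - 1) := by ring
          omega
        · have hk'pos : 1 ≤ k' := hk1
          have heq : (cv + (cv - 1) - 1) * 2 ^ (k' - 1) = (cv - 1) * 2 ^ (k' + 1 - 1) := by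
            have : k' + 1 - 1 = (k' - 1) + 1 := by omega
            rw [this, pow_succ]; ring
          omega

-- The least k ≥ 1 with (d)*2^k + 1 > t is unique.
lemma char_le (d t : Int) (hd : 1 ≤ d) (k1 k2 : Nat)
    (h1c : k1 = 1 ∨ d * 2 ^ (k1 - 1) + 1 ≤ t)
    (h2a : 1 ≤ k2) (h2b : t < d * 2 ^ k2 + 1) : k1 ≤ k2 := by
  by_contra h
  push Not at h
  rcases h1c with h1 | h1
  · omega
  · have hk : k2 ≤ k1 - 1 := by omega
    have hpow : (2 : Int) ^ k2 ≤ 2 ^ (k1 - 1) := by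
      exact pow_le_pow_right₀ (by norm_num) hk
    have : d * 2 ^ k2 ≤ d * 2 ^ (k1 - 1) := by
      exact mul_le_mul_of_nonneg_left hpow (by omega)
    omega

lemma char_unique (d t : Int) (hd : 1 ≤ d) (k1 k2 : Nat)
    (h1a : 1 ≤ k1) (h1b : t < d * 2 ^ k1 + 1) (h1c : k1 = 1 ∨ d * 2 ^ (k1 - 1) + 1 ≤ t)
    (h2a : 1 ≤ k2) (h2b : t < d * 2 ^ k2 + 1) (h2c : k2 = 1 ∨ d * 2 ^ (k2 - 1) + 1 ≤ t) : k1 = k2 :=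
  le_antisymm (char_le d t hd k1 k2 h1c h2a h2b) (char_le d t hd k2 k1 h2c h1a h1b)

-- B's closed-form count satisfies the same characterisation.
lemma alt_count_char (d t : Int) (hd : 1 ≤ d) (ht : d + 2 ≤ t) :
    1 ≤ max 1 (PySem.Int.bitLength (-(PySem.Int.floordiv (-t) d) - 1)) ∧
    t < d * 2 ^ (max 1 (PySem.Int.bitLength (-(PySem.Int.floordiv (-t) d) - 1))) + 1 ∧
    (max 1 (PySem.Int.bitLength (-(PySem.Int.floordiv (-t) d) - 1)) = 1 ∨
      d * 2 ^ (max 1 (PySem.Int.bitLength (-(PySem.Int.floordiv (-t) d) - 1)) - 1) + 1 ≤ t) := by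
  set m := -(PySem.Int.floordiv (-t) d) with hm
  have hceil : ((m - 1) * d < t ∧ t ≤ m * d) := by
    have := (PySem.Int.neg_floordiv_neg_eq_iff_of_pos (a := t) (b := d) (q := m) (by omega)).mp hm.symm
    exact this
  have hm2 : 2 ≤ m := by
    nlinarith [hceil.1, hceil.2]
  set K := max 1 (PySem.Int.bitLength (m - 1)) with hK
  have hbl : K = PySem.Int.bitLength (m - 1) := by
    have hne : m - 1 ≠ 0 := by omega
    have h1 : 1 ≤ PySem.Int.bitLength (m - 1) := by
      by_contra h
      have h0 : PySem.Int.bitLength (m - 1) = 0 := by omega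
      have := PySem.Int.lt_two_pow_bitLength (m - 1)
      rw [h0] at this
      simp at this
      omega
    omega
  have habs : (m - 1).natAbs = (m - 1).toNat := by omega
  have hub : m - 1 < (2 : Int) ^ K := by
    have h := PySem.Int.lt_two_pow_bitLength (m - 1)
    rw [← hbl] at h
    have h2 : ((m - 1).natAbs : Int) < ((2 ^ K : Nat) : Int) := Int.ofNat_lt.mpr h
    rw [Int.natAbs_of_nonneg (by omega)] at h2
    push_cast at h2
    exact h2
  have hK1 : 1 ≤ K := le_max_left _ _
  refine ⟨hK1, ?_, ?_⟩
  · -- t ≤ d * m ≤ d * 2^K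
    have h2K : m ≤ 2 ^ K := by omega
    have : d * m ≤ d * 2 ^ K := mul_le_mul_of_nonneg_left h2K (by omega)
    nlinarith [hceil.2]
  · by_cases hKone : K = 1
    · exact Or.inl hKone
    · right
      have hK2 : 2 ≤ K := by omega
      have hlb : (2 : Int) ^ (K - 1) ≤ m - 1 := by
        have hne : m - 1 ≠ 0 := by omega
        have h := PySem.Int.two_pow_bitLength_le (m - 1) hne
        rw [← hbl] at h
        have h2 : (((2 ^ (K - 1) : Nat)) : Int) ≤ ((m - 1).natAbs : Int) := Int.ofNat_le.mpr h
        rw [Int.natAbs_of_nonneg (by omega)] at h2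
        push_cast at h2
        exact h2
      -- d * 2^(K-1) ≤ d * (m-1) < t
      have : d * 2 ^ (K - 1) ≤ d * (m - 1) := mul_le_mul_of_nonneg_left (by omega) (by omega)
      nlinarith [hceil.1]

-- ===== VERDICT (by name: the statement is the Claim_ definition above) =====
theorem calcHowManyTimesAdd_spec : Claim_equal_calcHowManyTimesAdd := by
  intro cv t _ hpre
  unfold Spec_calcHowManyTimesAdd calcHowManyTimesAdd calcHowManyTimesAdd_alt
  by_cases h1 : cv = 1
  · simp [h1]
  · by_cases h2 : t < cv
    · simp [h1, h2]
    · by_cases h3 : cv = t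
      · simp [h3]
      · simp only [h1, h2, h3, if_false]
        have hcv2 : 2 ≤ cv := by
          rcases hpre with h | h <;> omega
        have hlt : cv < t := by omega
        obtain ⟨k, hk, hk1, hk2, hk3⟩ :=
          pvLoopA_spec ((t - cv).toNat + 1) cv t 0 hcv2 (by omega) (by omega)
        obtain ⟨hK1, hK2, hK3⟩ := alt_count_char (cv - 1) t (by omega) (by omega)
        have hkK : k = max 1 (PySem.Int.bitLength (-(PySem.Int.floordiv (-t) (cv - 1)) - 1)) :=
          char_unique (cv - 1) t (by omega) k _ hk1 hk2 hk3 hK1 hK2 hK3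
        simp only [hk, hkK]
        simp
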